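-- pv_equiv track=rewrite | github.com/parasiitism/AlgoDaily | leetcode/320-generalized-abbreviation/main.py | transform
-- ===== SOURCE A (Python) =====
-- def transform(s):
--     """
--     e.g. a###b##c# -> a3b2c1
--     """
--     count = 0
--     res = ""
--     for c in s:
--         if c == '#':
--             count += 1
--         else:
--             if count > 0:
--                 res += str(count)
--                 count = 0
--             res += c
--     if count > 0:
--         res += str(count)
--     return res
-- ===== SOURCE B (Python) =====
-- def transform(s):
--     """
--     e.g. a###b##c# -> a3b2c1
--     """
--     pieces = []
--     i = 0
--     n = len(s)
--     while i < n:
--         j = i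
--         while j < n and (s[j] == '#') == (s[i] == '#'):
--             j += 1
--         pieces.append(str(j - i) if s[i] == '#' else s[i:j])
--         i = j
--     return ''.join(pieces)
-- ===== Notes on version B (the rewrite author's own statement) =====
-- stated objective: alternative
-- what changed: B segments the string into maximal runs with a two-pointer scan and emits each run at once (count for '#'-runs, the slice for others), instead of A's char-by-char loop carrying a pending counter flushed at boundaries.
import Mathlib
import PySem

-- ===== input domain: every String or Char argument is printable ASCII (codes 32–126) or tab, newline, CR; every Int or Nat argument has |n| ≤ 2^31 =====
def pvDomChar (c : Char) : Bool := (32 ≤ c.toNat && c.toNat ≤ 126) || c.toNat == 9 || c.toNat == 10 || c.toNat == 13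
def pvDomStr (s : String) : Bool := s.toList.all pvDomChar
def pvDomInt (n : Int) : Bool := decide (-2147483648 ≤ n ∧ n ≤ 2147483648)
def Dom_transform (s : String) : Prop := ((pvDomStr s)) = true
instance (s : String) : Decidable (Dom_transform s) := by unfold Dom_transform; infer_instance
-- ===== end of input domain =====

-- B replaces A's char-by-char loop (pending '#'-counter flushed at boundaries) by a
-- run-segmentation scan emitting each maximal run at once; objective: alternative.

-- ===== PORT A =====
-- one iteration of A's for-loop over the state (count, res)
def transformStep (p : Int × String) (c : Char) : Int × String :=
  if c == '#' then (p.1 + 1, p.2)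
  else ((0 : Int), (if p.1 > 0 then p.2 ++ PySem.Int.toStr p.1 else p.2).push c)

def transform (s : String) : String :=
  let st := s.toList.foldl transformStep ((0 : Int), "")
  if st.1 > 0 then st.2 ++ PySem.Int.toStr st.1 else st.2

-- ===== PORT B =====
-- B's outer while-loop; the inner while-loop (advance j while s[j] agrees with s[i]
-- on being '#') is the takeWhile, the slice s[i:j] / count j-i come from that run.
def transformAltGo : List Char → String
  | [] => ""
  | c :: rest =>
    let run := (c :: rest).takeWhile (fun d => (d == '#') == (c == '#'))
    let rest' := (c :: rest).dropWhile (fun d => (d == '#') == (c == '#'))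
    (if c == '#' then PySem.Int.toStr (run.length : Int) else String.ofList run) ++ transformAltGo rest'
termination_by l => l.length
decreasing_by
  simp only [List.dropWhile_cons]
  split
  · simp only [List.length_cons]
    exact Nat.lt_succ_of_le (List.length_dropWhile_le _ _)
  · simp at *

def transform_alt (s : String) : String := transformAltGo s.toList

-- ===== PRECONDITION & SPEC =====
def Spec_transform (s : String) (out : String) : Prop := out = transform_alt s
instance (s : String) (out : String) : Decidable (Spec_transform s out) := by unfold Spec_transform; infer_instance

-- ===== CLAIM (what is proved, stated in full; the proofs are below) =====
def Claim_equal_transform : Prop := ∀ (s : String), Dom_transform s → Spec_transform s (transform s)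

-- ===== LEMMAS AND PROOFS =====

-- A's final flush applied to a loop state
def transformFinish (p : Int × String) : String :=
  if p.1 > 0 then p.2 ++ PySem.Int.toStr p.1 else p.2

-- folding A's step over a block of hashes only bumps the counter
lemma foldl_hash_run (h : List Char) (hh : ∀ x ∈ h, x = '#') (t : List Char)
    (count : Int) (res : String) :
    (h ++ t).foldl transformStep (count, res) = t.foldl transformStep (count + h.length, res) := by
  induction h generalizing count with
  | nil => simp
  | cons c cs ih =>
    have hc : c = '#' := hh c (by simp)
    simp only [List.cons_append, List.foldl_cons, transformStep, hc]
    simp only [beq_self_eq_true, if_true]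
    rw [ih (fun x hx => hh x (by simp [hx]))]
    congr 2
    simp only [List.length_cons]
    push_cast
    ring

-- peeling one non-hash char off B's recursion
lemma go_cons_nonhash (c : Char) (rest : List Char) (hc : (c == '#') = false) :
    (transformAltGo (c :: rest)).toList = c :: (transformAltGo rest).toList := by
  rw [transformAltGo]
  simp only [List.takeWhile_cons, List.dropWhile_cons, beq_self_eq_true, if_true, hc,
    Bool.false_eq_true, if_false, String.toList_append, String.toList_ofList]
  cases rest with
  | nil => simp [transformAltGo]
  | cons d t =>
    by_cases hd : (d == '#') = true
    · simp [List.takeWhile_cons, List.dropWhile_cons, hd, hc]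
    · rw [Bool.not_eq_true] at hd
      have hpp : (fun x : Char => (x == '#') == (d == '#')) =
          (fun x : Char => (x == '#') == (c == '#')) := by
        funext x; rw [hc, hd]
      conv_rhs => rw [transformAltGo]
      simp [List.takeWhile_cons, List.dropWhile_cons, hd, hc, hpp]

-- B's recursion on a hash-headed list, in terms of takeWhile/dropWhile of the tail
lemma go_cons_hash (rest : List Char) :
    transformAltGo ('#' :: rest) =
      PySem.Int.toStr ((((rest.takeWhile (fun d => d == '#')).length + 1 : Nat)) : Int) ++
        transformAltGo (rest.dropWhile (fun d => d == '#')) := by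
  rw [transformAltGo]
  simp [List.takeWhile_cons, List.dropWhile_cons]

-- main invariant: A's loop-then-flush from a clean counter equals res ++ B's output
lemma main_inv (n : Nat) : ∀ (l : List Char), l.length ≤ n → ∀ (res : String),
    (transformFinish (l.foldl transformStep ((0 : Int), res))).toList
      = res.toList ++ (transformAltGo l).toList := by
  induction n with
  | zero =>
    intro l hl res
    have hnil : l = [] := by cases l <;> simp_all
    rw [hnil]
    simp [transformFinish, transformAltGo]
  | succ n ih =>
    intro l hl res
    cases l with
    | nil => simp [transformFinish, transformAltGo]
    | cons c rest =>
      by_cases hc : (c == '#') = true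
      · have hceq : c = '#' := by simpa using hc
        subst hceq
        have hsplit : rest = rest.takeWhile (fun d => d == '#') ++
            rest.dropWhile (fun d => d == '#') := (List.takeWhile_append_dropWhile).symm
        have hall : ∀ x ∈ rest.takeWhile (fun d => d == '#'), x = '#' := by
          intro x hx
          simpa using List.mem_takeWhile_imp hx
        rw [List.foldl_cons]
        have hstep : transformStep ((0 : Int), res) '#' = ((1 : Int), res) := by
          simp [transformStep]
        rw [hstep]
        conv_lhs => rw [hsplit]
        rw [foldl_hash_run _ hall]
        rw [go_cons_hash]
        set h := rest.takeWhile (fun d => d == '#') with hh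
        set t' := rest.dropWhile (fun d => d == '#') with ht'
        have hK : (1 : Int) + (h.length : Int) = ((h.length + 1 : Nat) : Int) := by
          push_cast; ring
        cases ht'e : t' with
        | nil =>
          simp only [List.foldl_nil, transformFinish]
          have hpos : (1 : Int) + (h.length : Int) > 0 := by positivity
          rw [if_pos hpos, hK]
          simp [transformAltGo]
        | cons d t =>
          have hd : (d == '#') = false := by
            have hne : rest.dropWhile (fun d => d == '#') ≠ [] := by
              rw [← ht', ht'e]; exact List.cons_ne_nil d t
            have := List.head_dropWhile_not (fun d => d == '#') (l := rest) hne
            simpa [← ht', ht'e] using this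
          rw [List.foldl_cons]
          have hpos : (1 : Int) + (h.length : Int) > 0 := by positivity
          have hstep2 : transformStep ((1 : Int) + (h.length : Int), res) d =
              ((0 : Int), (res ++ PySem.Int.toStr ((1 : Int) + (h.length : Int))).push d) := by
            simp [transformStep, hd, hpos]
          rw [hstep2]
          have ht : t.length ≤ n := by
            have h1 : t'.length ≤ rest.length := ht' ▸ List.length_dropWhile_le _ _
            have h2 : rest.length ≤ n := by simpa using hl
            rw [ht'e] at h1
            simp at h1
            omega
          rw [ih t ht]
          simp only [String.toList_append, String.toList_push, List.append_assoc]
          rw [go_cons_nonhash d t hd, hK]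
          simp
      · rw [Bool.not_eq_true] at hc
        rw [List.foldl_cons]
        have hstep : transformStep ((0 : Int), res) c = ((0 : Int), res.push c) := by
          simp [transformStep, hc]
        rw [hstep]
        have hrest : rest.length ≤ n := by simpa using hl
        rw [ih rest hrest (res.push c)]
        rw [go_cons_nonhash c rest hc]
        simp [String.toList_push]

-- ===== VERDICT (by name: the statement is the Claim_ definition above) =====
theorem transform_spec : Claim_equal_transform := by
  intro s _
  unfold Spec_transform transform transform_alt
  apply String.toList_inj.mp
  have h := main_inv s.toList.length s.toList le_rfl ""
  simpa [transformFinish] using h
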